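-- pv_equiv track=rewrite | github.com/ximenaSilvaa/Computational-Methods | Programming a DFA /final.py | is_scientific_notation
-- ===== SOURCE A (Python) =====
-- def is_scientific_notation(token):
--     states = {'q0', 'q1', 'q2', 'q3', 'q4', 'q5', 'q6', 'q7', 'q8'}
--     alphabet = {'digit', 'sign', 'decimal_point', 'exponent'}
--     transition_table = {
--         'q0': {'digit': 'q1', 'sign': 'q2', 'decimal_point': 'q3', 'exponent': 'q5'},
--         'q1': {'digit': 'q1', 'sign': 'q5', 'decimal_point': 'q3', 'exponent': 'q6'},
--         'q2': {'digit': 'q1', 'sign': 'q5', 'decimal_point': 'q3', 'exponent': 'q5'},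
--         'q3': {'digit': 'q4', 'sign': 'q5', 'decimal_point': 'q5', 'exponent': 'q6'},
--         'q4': {'digit': 'q4', 'sign': 'q5', 'decimal_point': 'q5', 'exponent': 'q6'},
--         'q5': {'digit': 'q5', 'sign': 'q5', 'decimal_point': 'q5', 'exponent': 'q5'},
--         'q6': {'digit': 'q8', 'sign': 'q7', 'decimal_point': 'q5', 'exponent': 'q5'},
--         'q7': {'digit': 'q8', 'sign': 'q5', 'decimal_point': 'q5', 'exponent': 'q5'},
--         'q8': {'digit': 'q8', 'sign': 'q5', 'decimal_point': 'q5', 'exponent': 'q5'}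
--     }
--
--     current_state = 'q0'
--     final_states = {'q8'}
--     for char in token:
--         if char.isdigit():
--             input_type = 'digit'
--         elif char in '+-':
--             input_type = 'sign'
--         elif char == '.':
--             input_type = 'decimal_point'
--         elif char == 'E':
--             input_type = 'exponent'
--         else:
--             return False
--         current_state = transition_table[current_state].get(input_type, 'q5')
--
--     return current_state in final_states
-- ===== SOURCE B (Python) =====
-- def is_scientific_notation(token):
--     parts = token.split('E')
--     if len(parts) != 2:
--         return False
--     mant, exp = parts
--     if mant[:1] in ('+', '-'):
--         mant = mant[1:]
--     if mant.isdigit():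
--         mant_ok = True
--     else:
--         sub = mant.split('.')
--         mant_ok = (len(sub) == 2
--                    and (sub[0] == '' or sub[0].isdigit())
--                    and (sub[1] == '' or sub[1].isdigit()))
--     if exp[:1] in ('+', '-'):
--         exp = exp[1:]
--     return mant_ok and exp.isdigit()
-- ===== Notes on version B (the rewrite author's own statement) =====
-- stated objective: simpler
-- what changed: Replaces the 9-state table-driven DFA scan with a direct decomposition: split the token at the exponent separator into exactly two parts, validate the mantissa (optional sign, then all digits or a digits-dot-digits form with either side possibly empty) and the exponent (optional sign, then nonempty digits).
import Mathlib
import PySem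

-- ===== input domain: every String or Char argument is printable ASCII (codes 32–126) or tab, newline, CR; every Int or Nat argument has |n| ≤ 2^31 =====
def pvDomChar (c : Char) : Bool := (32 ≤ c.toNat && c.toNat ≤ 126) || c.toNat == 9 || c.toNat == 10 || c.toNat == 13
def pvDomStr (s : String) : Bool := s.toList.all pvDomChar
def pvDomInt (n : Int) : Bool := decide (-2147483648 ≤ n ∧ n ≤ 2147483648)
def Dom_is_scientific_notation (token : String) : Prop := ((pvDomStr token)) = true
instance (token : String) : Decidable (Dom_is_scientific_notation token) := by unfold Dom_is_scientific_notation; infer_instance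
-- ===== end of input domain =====

-- B replaces A's 9-state table-driven DFA scan by splitting the token on 'E' and
-- validating mantissa and exponent parts directly (objective: simpler).

-- ===== PORT A =====
-- the transition table of A, literally
def pvTableA : PySem.Dict String (PySem.Dict String String) :=
  PySem.Dict.ofList [
    ("q0", PySem.Dict.ofList [("digit","q1"),("sign","q2"),("decimal_point","q3"),("exponent","q5")]),
    ("q1", PySem.Dict.ofList [("digit","q1"),("sign","q5"),("decimal_point","q3"),("exponent","q6")]),
    ("q2", PySem.Dict.ofList [("digit","q1"),("sign","q5"),("decimal_point","q3"),("exponent","q5")]),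
    ("q3", PySem.Dict.ofList [("digit","q4"),("sign","q5"),("decimal_point","q5"),("exponent","q6")]),
    ("q4", PySem.Dict.ofList [("digit","q4"),("sign","q5"),("decimal_point","q5"),("exponent","q6")]),
    ("q5", PySem.Dict.ofList [("digit","q5"),("sign","q5"),("decimal_point","q5"),("exponent","q5")]),
    ("q6", PySem.Dict.ofList [("digit","q8"),("sign","q7"),("decimal_point","q5"),("exponent","q5")]),
    ("q7", PySem.Dict.ofList [("digit","q8"),("sign","q5"),("decimal_point","q5"),("exponent","q5")]),
    ("q8", PySem.Dict.ofList [("digit","q8"),("sign","q5"),("decimal_point","q5"),("exponent","q5")])]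

-- the loop body's classification: digit / sign / decimal_point / exponent, else the early 'return False'
def pvClassifyA (c : Char) : Option String :=
  if PySem.Chars.isdigit c then some "digit"
  else if PySem.Chars.isIn [c] ['+','-'] then some "sign"
  else if c = '.' then some "decimal_point"
  else if c = 'E' then some "exponent"
  else none

-- transition_table[current_state].get(input_type, 'q5'); the outer lookup never misses
-- (current_state always stays in the table), so its totalization with an empty dict is exact
def pvStepA (current_state input_type : String) : String :=
  ((pvTableA.get? current_state).getD PySem.Dict.empty).getD input_type "q5"

-- the for-loop with its early return, then 'current_state in final_states'
def pvLoopA : List Char → String → Bool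
  | [], current_state => List.contains (PySem.Set.ofList ["q8"]) current_state
  | c :: rest, current_state =>
      match pvClassifyA c with
      | none => false
      | some input_type => pvLoopA rest (pvStepA current_state input_type)

def is_scientific_notation (token : String) : Bool :=
  pvLoopA token.toList "q0"

-- ===== PORT B =====
-- s[:1] in ('+', '-')  →  s[1:]
def pvStripSign (s : List Char) : List Char :=
  match s with
  | c :: rest => if c = '+' ∨ c = '-' then rest else c :: rest
  | [] => []

-- mantissa check of Source B (token.split('.') ported as List.splitOn, exact for a 1-char separator)
def pvMantOk (mant0 : List Char) : Bool :=
  let mant := pvStripSign mant0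
  if PySem.Chars.strIsdigit mant then
    true
  else
    match mant.splitOn '.' with
    | [l, r] => (l.isEmpty || PySem.Chars.strIsdigit l) && (r.isEmpty || PySem.Chars.strIsdigit r)
    | _ => false

def pvExpOk (exp0 : List Char) : Bool :=
  PySem.Chars.strIsdigit (pvStripSign exp0)

def is_scientific_notation_alt (token : String) : Bool :=
  match token.toList.splitOn 'E' with
  | [mant, exp] => pvMantOk mant && pvExpOk exp
  | _ => false

-- ===== PRECONDITION & SPEC =====
def Spec_is_scientific_notation (token : String) (out : Bool) : Prop := out = is_scientific_notation_alt token
instance (token : String) (out : Bool) : Decidable (Spec_is_scientific_notation token out) := by unfold Spec_is_scientific_notation; infer_instance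

-- ===== CLAIM (what is proved, stated in full; the proofs are below) =====
def Claim_equal_is_scientific_notation : Prop := ∀ (token : String), Dom_is_scientific_notation token → Spec_is_scientific_notation token (is_scientific_notation token)

-- ===== LEMMAS AND PROOFS =====

-- clean reformulations of A's run from each reachable state
def pvDig (c : Char) : Bool := PySem.Chars.isdigit c

def rQ8 (cs : List Char) : Bool := cs.all PySem.Chars.isdigit

def rQ7 : List Char → Bool
  | [] => false
  | c :: r => pvDig c && rQ8 r

def rQ6 : List Char → Bool
  | [] => false
  | c :: r => if pvDig c then rQ8 r else if c = '+' ∨ c = '-' then rQ7 r else false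

def rQ4 : List Char → Bool
  | [] => false
  | c :: r => if pvDig c then rQ4 r else if c = 'E' then rQ6 r else false

def rQ1 : List Char → Bool
  | [] => false
  | c :: r => if pvDig c then rQ1 r else if c = '.' then rQ4 r else if c = 'E' then rQ6 r else false

def rQ2 : List Char → Bool
  | [] => false
  | c :: r => if pvDig c then rQ1 r else if c = '.' then rQ4 r else false

def rQ0 : List Char → Bool
  | [] => false
  | c :: r =>
      if pvDig c then rQ1 r
      else if c = '+' ∨ c = '-' then rQ2 r
      else if c = '.' then rQ4 r
      else false

-- character classification facts
lemma pvDig_ne_plus {c : Char} (h : pvDig c = true) : ¬ (c = '+' ∨ c = '-') := by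
  simp only [pvDig, PySem.Chars.isdigit, Bool.and_eq_true, decide_eq_true_eq] at h
  rintro (rfl | rfl) <;> revert h <;> decide

lemma pvDig_ne_dot {c : Char} (h : pvDig c = true) : c ≠ '.' := by
  simp only [pvDig, PySem.Chars.isdigit, Bool.and_eq_true, decide_eq_true_eq] at h
  rintro rfl; revert h; decide

lemma pvDig_ne_E {c : Char} (h : pvDig c = true) : c ≠ 'E' := by
  simp only [pvDig, PySem.Chars.isdigit, Bool.and_eq_true, decide_eq_true_eq] at h
  rintro rfl; revert h; decide

lemma pvSign_isIn (c : Char) : PySem.Chars.isIn [c] ['+','-'] = true ↔ (c = '+' ∨ c = '-') := by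
  rw [PySem.Chars.isIn_iff_infix]
  constructor
  · intro hin
    have := hin.mem (List.mem_singleton.2 rfl)
    simpa using this
  · rintro (rfl | rfl) <;> decide

-- the 36 concrete transitions of A's table
lemma pvStep_q0_d : pvStepA "q0" "digit" = "q1" := by decide
lemma pvStep_q0_s : pvStepA "q0" "sign" = "q2" := by decide
lemma pvStep_q0_p : pvStepA "q0" "decimal_point" = "q3" := by decide
lemma pvStep_q0_e : pvStepA "q0" "exponent" = "q5" := by decide
lemma pvStep_q1_d : pvStepA "q1" "digit" = "q1" := by decide
lemma pvStep_q1_s : pvStepA "q1" "sign" = "q5" := by decide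
lemma pvStep_q1_p : pvStepA "q1" "decimal_point" = "q3" := by decide
lemma pvStep_q1_e : pvStepA "q1" "exponent" = "q6" := by decide
lemma pvStep_q2_d : pvStepA "q2" "digit" = "q1" := by decide
lemma pvStep_q2_s : pvStepA "q2" "sign" = "q5" := by decide
lemma pvStep_q2_p : pvStepA "q2" "decimal_point" = "q3" := by decide
lemma pvStep_q2_e : pvStepA "q2" "exponent" = "q5" := by decide
lemma pvStep_q3_d : pvStepA "q3" "digit" = "q4" := by decide
lemma pvStep_q3_s : pvStepA "q3" "sign" = "q5" := by decide
lemma pvStep_q3_p : pvStepA "q3" "decimal_point" = "q5" := by decide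
lemma pvStep_q3_e : pvStepA "q3" "exponent" = "q6" := by decide
lemma pvStep_q4_d : pvStepA "q4" "digit" = "q4" := by decide
lemma pvStep_q4_s : pvStepA "q4" "sign" = "q5" := by decide
lemma pvStep_q4_p : pvStepA "q4" "decimal_point" = "q5" := by decide
lemma pvStep_q4_e : pvStepA "q4" "exponent" = "q6" := by decide
lemma pvStep_q5_d : pvStepA "q5" "digit" = "q5" := by decide
lemma pvStep_q5_s : pvStepA "q5" "sign" = "q5" := by decide
lemma pvStep_q5_p : pvStepA "q5" "decimal_point" = "q5" := by decide
lemma pvStep_q5_e : pvStepA "q5" "exponent" = "q5" := by decide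
lemma pvStep_q6_d : pvStepA "q6" "digit" = "q8" := by decide
lemma pvStep_q6_s : pvStepA "q6" "sign" = "q7" := by decide
lemma pvStep_q6_p : pvStepA "q6" "decimal_point" = "q5" := by decide
lemma pvStep_q6_e : pvStepA "q6" "exponent" = "q5" := by decide
lemma pvStep_q7_d : pvStepA "q7" "digit" = "q8" := by decide
lemma pvStep_q7_s : pvStepA "q7" "sign" = "q5" := by decide
lemma pvStep_q7_p : pvStepA "q7" "decimal_point" = "q5" := by decide
lemma pvStep_q7_e : pvStepA "q7" "exponent" = "q5" := by decide
lemma pvStep_q8_d : pvStepA "q8" "digit" = "q8" := by decide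
lemma pvStep_q8_s : pvStepA "q8" "sign" = "q5" := by decide
lemma pvStep_q8_p : pvStepA "q8" "decimal_point" = "q5" := by decide
lemma pvStep_q8_e : pvStepA "q8" "exponent" = "q5" := by decide

-- A's loop from each of the reachable states equals the corresponding clean run
lemma pvLoopA_states (cs : List Char) :
    pvLoopA cs "q0" = rQ0 cs ∧ pvLoopA cs "q1" = rQ1 cs ∧ pvLoopA cs "q2" = rQ2 cs ∧
    pvLoopA cs "q3" = rQ4 cs ∧ pvLoopA cs "q4" = rQ4 cs ∧ pvLoopA cs "q5" = false ∧
    pvLoopA cs "q6" = rQ6 cs ∧ pvLoopA cs "q7" = rQ7 cs ∧ pvLoopA cs "q8" = rQ8 cs := by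
  induction cs with
  | nil =>
    refine ⟨?_, ?_, ?_, ?_, ?_, ?_, ?_, ?_, ?_⟩ <;> decide
  | cons c r ih =>
    obtain ⟨i0, i1, i2, i3, i4, i5, i6, i7, i8⟩ := ih
    by_cases hd : pvDig c
    · have hcl : pvClassifyA c = some "digit" := by
        simp [pvClassifyA, (show PySem.Chars.isdigit c = true from hd)]
      have hd' : PySem.Chars.isdigit c = true := hd
      have hs : ¬ (c = '+' ∨ c = '-') := pvDig_ne_plus hd
      have hdot : c ≠ '.' := pvDig_ne_dot hd
      have hE : c ≠ 'E' := pvDig_ne_E hd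
      refine ⟨?_, ?_, ?_, ?_, ?_, ?_, ?_, ?_, ?_⟩ <;>
        simp [pvLoopA, hcl, pvStep_q0_d, pvStep_q1_d, pvStep_q2_d, pvStep_q3_d, pvStep_q4_d,
          pvStep_q5_d, pvStep_q6_d, pvStep_q7_d, pvStep_q8_d,
          rQ0, rQ1, rQ2, rQ4, rQ6, rQ7, rQ8, pvDig, hd, hd', hs, hdot, hE,
          i0, i1, i2, i3, i4, i5, i6, i7, i8]
    · have hdf : PySem.Chars.isdigit c = false := by simpa [pvDig] using hd
      by_cases hs : c = '+' ∨ c = '-'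
      · have hcl : pvClassifyA c = some "sign" := by
          simp [pvClassifyA, hdf, (pvSign_isIn c).2 hs]
        have hdot : c ≠ '.' := by rintro rfl; rcases hs with h | h <;> simp at h
        have hE : c ≠ 'E' := by rintro rfl; rcases hs with h | h <;> simp at h
        refine ⟨?_, ?_, ?_, ?_, ?_, ?_, ?_, ?_, ?_⟩ <;>
          simp [pvLoopA, hcl, pvStep_q0_s, pvStep_q1_s, pvStep_q2_s, pvStep_q3_s, pvStep_q4_s,
            pvStep_q5_s, pvStep_q6_s, pvStep_q7_s, pvStep_q8_s,
            rQ0, rQ1, rQ2, rQ4, rQ6, rQ7, rQ8, pvDig, hdf, hs, hdot, hE,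
            i0, i1, i2, i3, i4, i5, i6, i7, i8]
      · have hnotin : PySem.Chars.isIn [c] ['+','-'] = false := by
          rcases Bool.eq_false_or_eq_true (PySem.Chars.isIn [c] ['+','-']) with h | h
          · exact absurd ((pvSign_isIn c).1 h) hs
          · exact h
        have hplus : c ≠ '+' := fun hh => hs (Or.inl hh)
        have hminus : c ≠ '-' := fun hh => hs (Or.inr hh)
        by_cases hdot : c = '.'
        · subst hdot
          have hcl : pvClassifyA '.' = some "decimal_point" := by decide
          refine ⟨?_, ?_, ?_, ?_, ?_, ?_, ?_, ?_, ?_⟩ <;>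
            simp [pvLoopA, hcl, pvStep_q0_p, pvStep_q1_p, pvStep_q2_p, pvStep_q3_p, pvStep_q4_p,
              pvStep_q5_p, pvStep_q6_p, pvStep_q7_p, pvStep_q8_p,
              rQ0, rQ1, rQ2, rQ4, rQ6, rQ7, rQ8, pvDig, hdf,
              i0, i1, i2, i3, i4, i5, i6, i7, i8]
        · by_cases hE : c = 'E'
          · subst hE
            have hcl : pvClassifyA 'E' = some "exponent" := by decide
            refine ⟨?_, ?_, ?_, ?_, ?_, ?_, ?_, ?_, ?_⟩ <;>
              simp [pvLoopA, hcl, pvStep_q0_e, pvStep_q1_e, pvStep_q2_e, pvStep_q3_e, pvStep_q4_e,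
                pvStep_q5_e, pvStep_q6_e, pvStep_q7_e, pvStep_q8_e,
                rQ0, rQ1, rQ2, rQ4, rQ6, rQ7, rQ8, pvDig, hdf, hdot,
                i0, i1, i2, i3, i4, i5, i6, i7, i8]
          · have hcl : pvClassifyA c = none := by
              simp [pvClassifyA, hdf, hnotin, hdot, hE]
            refine ⟨?_, ?_, ?_, ?_, ?_, ?_, ?_, ?_, ?_⟩ <;>
              simp [pvLoopA, hcl, rQ0, rQ1, rQ2, rQ4, rQ6, rQ7, rQ8, pvDig, hdf,
                hplus, hminus, hdot, hE]

-- splitOn facts for a single-character separator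
lemma pvSplit_nil (sep : Char) : ([] : List Char).splitOn sep = [[]] := by
  simp [List.splitOn]

lemma pvSplit_ne_nil (r : List Char) (sep : Char) : r.splitOn sep ≠ [] :=
  List.splitOnP_ne_nil _ _

lemma pvSplit_cons (c sep : Char) (r : List Char) :
    (c :: r).splitOn sep =
      if c = sep then [] :: r.splitOn sep
      else (c :: (r.splitOn sep).headI) :: (r.splitOn sep).tail := by
  rcases Decidable.em (c = sep) with h | h <;>
    simp [List.splitOn, List.splitOnP_cons, h]
  rcases hs : List.splitOnP (fun x => x == sep) r with _ | ⟨l, ls⟩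
  · exact absurd hs (List.splitOnP_ne_nil _ _)
  · simp

lemma pvSplit_no_sep (r : List Char) (sep : Char) (h : sep ∉ r) : r.splitOn sep = [r] := by
  induction r with
  | nil => exact pvSplit_nil sep
  | cons c r ih =>
    simp only [List.mem_cons, not_or] at h
    have hc : ¬ (c = sep) := fun hh => h.1 hh.symm
    rw [pvSplit_cons, if_neg hc, ih h.2]
    rfl

lemma pvSplit_mem_len (r : List Char) (sep : Char) (h : sep ∈ r) :
    2 ≤ (r.splitOn sep).length := by
  induction r with
  | nil => simp at h
  | cons c r ih =>
    rw [pvSplit_cons]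
    rcases Decidable.em (c = sep) with hc | hc
    · rw [if_pos hc]
      have := pvSplit_ne_nil r sep
      have : 1 ≤ (r.splitOn sep).length := by
        rcases hh : r.splitOn sep with _ | ⟨a, b⟩
        · exact absurd hh this
        · simp
      simp only [List.length_cons]
      omega
    · rw [if_neg hc]
      have hm : sep ∈ r := by
        rcases List.mem_cons.1 h with hh | hh
        · exact absurd hh.symm hc
        · exact hh
      have h2 := ih hm
      rcases hh : r.splitOn sep with _ | ⟨a, b⟩
      · exact absurd hh (pvSplit_ne_nil r sep)
      · rw [hh] at h2; simp at h2 ⊢; omega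

-- generic two-part shape check
def chTwo (P Q : List Char → Bool) : List (List Char) → Bool
  | [m, e] => P m && Q e
  | _ => false

lemma chTwo_congr {P P' Q : List Char → Bool} (h : ∀ m, P m = P' m) (parts : List (List Char)) :
    chTwo P Q parts = chTwo P' Q parts := by
  rcases parts with _ | ⟨m, _ | ⟨e, _ | _⟩⟩ <;> simp [chTwo, h]

lemma chTwo_false {P Q : List Char → Bool} (h : ∀ m, P m = false) (parts : List (List Char)) :
    chTwo P Q parts = false := by
  rcases parts with _ | ⟨m, _ | ⟨e, _ | _⟩⟩ <;> simp [chTwo, h]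

lemma chTwo_cons {P Q : List Char → Bool} {c sep : Char} (r : List Char) (h : ¬ c = sep) :
    chTwo P Q ((c :: r).splitOn sep) = chTwo (fun m => P (c :: m)) Q (r.splitOn sep) := by
  rw [pvSplit_cons, if_neg h]
  rcases hh : r.splitOn sep with _ | ⟨m, _ | ⟨e, _ | _⟩⟩
  · exact absurd hh (pvSplit_ne_nil r sep)
  · simp [chTwo]
  · simp [chTwo]
  · simp [chTwo]

lemma chTwo_sep {P Q : List Char → Bool} {sep : Char} (r : List Char)
    (h : sep ∈ r → Q r = false) :
    chTwo P Q ((sep :: r).splitOn sep) = (P [] && Q r) := by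
  rw [pvSplit_cons, if_pos rfl]
  by_cases hm : sep ∈ r
  · have hlen := pvSplit_mem_len r sep hm
    rcases hh : r.splitOn sep with _ | ⟨a, _ | ⟨b, _ | _⟩⟩ <;> rw [hh] at hlen <;>
      simp at hlen <;> simp [chTwo, h hm]
  · rw [pvSplit_no_sep r sep hm]
    simp [chTwo]

-- 'E' inside a string kills every digit check
lemma pvAll_false_of_mem {r : List Char} {c : Char} (hm : c ∈ r) (hc : PySem.Chars.isdigit c = false) :
    r.all PySem.Chars.isdigit = false := by
  rcases Bool.eq_false_or_eq_true (r.all PySem.Chars.isdigit) with h | h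
  · exact absurd (List.all_eq_true.1 h c hm) (by simp [hc])
  · exact h

lemma pvStrIsdigit_eq (s : List Char) :
    PySem.Chars.strIsdigit s = (!s.isEmpty && s.all PySem.Chars.isdigit) := rfl

lemma pvExpOk_false_of_E {r : List Char} (hm : 'E' ∈ r) : pvExpOk r = false := by
  have hE : PySem.Chars.isdigit 'E' = false := by decide
  rcases r with _ | ⟨c, r'⟩
  · simp at hm
  · simp only [pvExpOk, pvStripSign]
    rcases Decidable.em (c = '+' ∨ c = '-') with hs | hs
    · rw [if_pos hs]
      have hm' : 'E' ∈ r' := by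
        rcases List.mem_cons.1 hm with h | h
        · exfalso; rcases hs with rfl | rfl <;> simp at h
        · exact h
      rw [pvStrIsdigit_eq, pvAll_false_of_mem hm' hE, Bool.and_false]
    · rw [if_neg hs, pvStrIsdigit_eq, pvAll_false_of_mem hm hE, Bool.and_false]

-- the exponent automaton is B's exponent check
lemma rQ6_eq_expOk (cs : List Char) : rQ6 cs = pvExpOk cs := by
  rcases cs with _ | ⟨c, r⟩
  · simp [rQ6, pvExpOk, pvStripSign, pvStrIsdigit_eq]
  · by_cases hd : pvDig c
    · have hs := pvDig_ne_plus hd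
      simp [rQ6, hd, pvExpOk, pvStripSign, hs, pvStrIsdigit_eq, rQ8]
      simp [pvDig] at hd
      simp [hd]
    · rcases Decidable.em (c = '+' ∨ c = '-') with hs | hs
      · simp only [rQ6, hd, Bool.false_eq_true, if_false, if_pos hs, pvExpOk, pvStripSign]
        rcases r with _ | ⟨d, r'⟩
        · simp [rQ7, pvStrIsdigit_eq]
        · simp [rQ7, rQ8, pvStrIsdigit_eq, pvDig]
      · have hcd : PySem.Chars.isdigit c = false := by simpa [pvDig] using hd
        simp [rQ6, hd, hs, pvExpOk, pvStripSign, pvStrIsdigit_eq, hcd]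

-- all-digits predicate used for the part after a '.' and after 'E'-digits states
def pvAllD (m : List Char) : Bool := m.all PySem.Chars.isdigit

-- B's mantissa shape after the optional sign: digits, or digits '.' digits (sides may be empty)
def pvTail1 (m : List Char) : Bool :=
  pvAllD m || chTwo pvAllD pvAllD (m.splitOn '.')

lemma pvAllD_false_of_dot {r : List Char} (hm : '.' ∈ r) : pvAllD r = false :=
  pvAll_false_of_mem hm (by decide)

lemma pvTail1_digit {c : Char} (m : List Char) (hd : pvDig c = true) :
    pvTail1 (c :: m) = pvTail1 m := by
  have hdot := pvDig_ne_dot hd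
  have hc : PySem.Chars.isdigit c = true := hd
  simp only [pvTail1]
  rw [chTwo_cons m hdot]
  rw [chTwo_congr (P' := pvAllD) (fun l => by simp [pvAllD, hc]) (m.splitOn '.')]
  simp [pvAllD, hc]

lemma pvTail1_dot (m : List Char) : pvTail1 ('.' :: m) = pvAllD m := by
  simp only [pvTail1]
  rw [chTwo_sep m (fun hm => pvAllD_false_of_dot hm)]
  have h1 : pvAllD ('.' :: m) = false := pvAllD_false_of_dot (List.mem_cons_self)
  simp [pvAllD]

lemma pvTail1_bad {c : Char} (m : List Char) (hd : pvDig c = false) (hdot : ¬ c = '.') :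
    pvTail1 (c :: m) = false := by
  have hc : PySem.Chars.isdigit c = false := hd
  simp only [pvTail1]
  rw [chTwo_cons m hdot]
  rw [chTwo_false (fun l => by simp [pvAllD, hc]) (m.splitOn '.')]
  simp [pvAllD, hc]

-- B's unsigned-mantissa body equals the nonempty-and-tail1 form
lemma pvMantBody_eq (m : List Char) :
    (if PySem.Chars.strIsdigit m then true
     else match m.splitOn '.' with
          | [l, r] => (l.isEmpty || PySem.Chars.strIsdigit l) && (r.isEmpty || PySem.Chars.strIsdigit r)
          | _ => false) = (!m.isEmpty && pvTail1 m) := by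
  have hside : ∀ l : List Char, (l.isEmpty || PySem.Chars.strIsdigit l) = pvAllD l := by
    intro l; rcases l with _ | ⟨a, l'⟩ <;> simp [pvStrIsdigit_eq, pvAllD]
  have hdot : (match m.splitOn '.' with
          | [l, r] => (l.isEmpty || PySem.Chars.strIsdigit l) && (r.isEmpty || PySem.Chars.strIsdigit r)
          | _ => false) = chTwo pvAllD pvAllD (m.splitOn '.') := by
    rcases hh : m.splitOn '.' with _ | ⟨l, _ | ⟨r, _ | _⟩⟩ <;> simp [chTwo, hside]
  rcases m with _ | ⟨c, m'⟩
  · rw [hdot]; simp [pvStrIsdigit_eq, chTwo]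
  · rw [hdot]
    simp only [pvStrIsdigit_eq, pvTail1, List.isEmpty_cons, Bool.not_false, Bool.true_and, pvAllD]
    rcases Bool.eq_false_or_eq_true ((c :: m').all PySem.Chars.isdigit) with h | h <;> simp [h]

-- characterizations of the mantissa-reading states via the split on 'E'
lemma rQ4_char (cs : List Char) : rQ4 cs = chTwo pvAllD pvExpOk (cs.splitOn 'E') := by
  induction cs with
  | nil => rw [pvSplit_nil]; simp [rQ4, chTwo]
  | cons c r ih =>
    by_cases hd : pvDig c
    · have hE := pvDig_ne_E hd
      rw [chTwo_cons r hE]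
      rw [chTwo_congr (P' := pvAllD) (fun l => by simp [pvAllD, (show PySem.Chars.isdigit c = true from hd)]) (r.splitOn 'E')]
      simp only [rQ4, hd, if_pos]
      exact ih
    · by_cases hE : c = 'E'
      · subst hE
        rw [chTwo_sep r (fun hm => pvExpOk_false_of_E hm)]
        simp only [rQ4, hd, Bool.false_eq_true, if_false, if_pos rfl]
        rw [rQ6_eq_expOk]
        simp [pvAllD]
      · rw [chTwo_cons r hE]
        rw [chTwo_false (fun l => by simp [pvAllD, (show PySem.Chars.isdigit c = false by simpa [pvDig] using hd)]) (r.splitOn 'E')]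
        simp [rQ4, hd, hE]

lemma rQ1_char (cs : List Char) : rQ1 cs = chTwo pvTail1 pvExpOk (cs.splitOn 'E') := by
  induction cs with
  | nil => rw [pvSplit_nil]; simp [rQ1, chTwo]
  | cons c r ih =>
    by_cases hd : pvDig c
    · have hE := pvDig_ne_E hd
      rw [chTwo_cons r hE]
      rw [chTwo_congr (P' := pvTail1) (fun l => pvTail1_digit l hd) (r.splitOn 'E')]
      simp only [rQ1, hd, if_pos]
      exact ih
    · by_cases hdot : c = '.'
      · subst hdot
        rw [chTwo_cons r (by decide)]
        rw [chTwo_congr (P' := pvAllD) (fun l => pvTail1_dot l) (r.splitOn 'E')]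
        simp only [rQ1, hd, Bool.false_eq_true, if_false, if_pos rfl]
        exact rQ4_char r
      · by_cases hE : c = 'E'
        · subst hE
          rw [chTwo_sep r (fun hm => pvExpOk_false_of_E hm)]
          simp only [rQ1, hd, hdot, Bool.false_eq_true, if_false, if_pos rfl]
          rw [rQ6_eq_expOk]
          simp [pvTail1, pvAllD, chTwo]
        · rw [chTwo_cons r hE]
          rw [chTwo_false (fun l => pvTail1_bad l (by simpa [pvDig] using hd) hdot) (r.splitOn 'E')]
          simp [rQ1, hd, hdot, hE]

def pvTail2 (m : List Char) : Bool := !m.isEmpty && pvTail1 m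

lemma rQ2_char (cs : List Char) : rQ2 cs = chTwo pvTail2 pvExpOk (cs.splitOn 'E') := by
  rcases cs with _ | ⟨c, r⟩
  · rw [pvSplit_nil]; simp [rQ2, chTwo]
  · by_cases hd : pvDig c
    · have hE := pvDig_ne_E hd
      rw [chTwo_cons r hE]
      rw [chTwo_congr (P' := pvTail1) (fun l => by simp [pvTail2, pvTail1_digit l hd]) (r.splitOn 'E')]
      simp only [rQ2, hd, if_pos]
      exact rQ1_char r
    · by_cases hdot : c = '.'
      · subst hdot
        rw [chTwo_cons r (by decide)]
        rw [chTwo_congr (P' := pvAllD) (fun l => by simp [pvTail2, pvTail1_dot l]) (r.splitOn 'E')]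
        simp only [rQ2, hd, Bool.false_eq_true, if_false, if_pos rfl]
        exact rQ4_char r
      · by_cases hE : c = 'E'
        · subst hE
          rw [chTwo_sep r (fun hm => pvExpOk_false_of_E hm)]
          simp [rQ2, hd, hdot, pvTail2]
        · rw [chTwo_cons r hE]
          rw [chTwo_false (fun l => by simp [pvTail2, pvTail1_bad l (by simpa [pvDig] using hd) hdot]) (r.splitOn 'E')]
          simp [rQ2, hd, hdot]

-- pvMantOk in terms of pvTail1 / pvTail2
lemma pvMantOk_nosign {c : Char} (m : List Char) (hs : ¬ (c = '+' ∨ c = '-')) :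
    pvMantOk (c :: m) = pvTail1 (c :: m) := by
  simp only [pvMantOk, pvStripSign, if_neg hs]
  rw [pvMantBody_eq]
  simp

lemma pvMantOk_sign {c : Char} (m : List Char) (hs : c = '+' ∨ c = '-') :
    pvMantOk (c :: m) = pvTail2 m := by
  simp only [pvMantOk, pvStripSign, if_pos hs, pvTail2]
  exact pvMantBody_eq m

lemma pvMantOk_nil : pvMantOk [] = false := by decide

-- the full automaton from q0 equals B
lemma rQ0_char (cs : List Char) : rQ0 cs = chTwo pvMantOk pvExpOk (cs.splitOn 'E') := by
  rcases cs with _ | ⟨c, r⟩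
  · rw [pvSplit_nil]; simp [rQ0, chTwo]
  · by_cases hd : pvDig c
    · have hE := pvDig_ne_E hd
      have hs := pvDig_ne_plus hd
      rw [chTwo_cons r hE]
      rw [chTwo_congr (P' := pvTail1) (fun l => by rw [pvMantOk_nosign l hs, pvTail1_digit l hd]) (r.splitOn 'E')]
      simp only [rQ0, hd, if_pos]
      exact rQ1_char r
    · by_cases hs : c = '+' ∨ c = '-'
      · have hE : ¬ c = 'E' := by rintro rfl; rcases hs with h | h <;> simp at h
        rw [chTwo_cons r hE]
        rw [chTwo_congr (P' := pvTail2) (fun l => pvMantOk_sign l hs) (r.splitOn 'E')]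
        simp only [rQ0, hd, Bool.false_eq_true, if_false, if_pos hs]
        exact rQ2_char r
      · by_cases hdot : c = '.'
        · subst hdot
          rw [chTwo_cons r (by decide)]
          rw [chTwo_congr (P' := pvAllD)
            (fun l => by rw [pvMantOk_nosign l hs, pvTail1_dot l]) (r.splitOn 'E')]
          simp only [rQ0, hd, hs, Bool.false_eq_true, if_false, if_pos rfl]
          exact rQ4_char r
        · by_cases hE : c = 'E'
          · subst hE
            rw [chTwo_sep r (fun hm => pvExpOk_false_of_E hm)]
            simp [rQ0, hd, pvMantOk_nil]
          · rw [chTwo_cons r hE]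
            rw [chTwo_false (fun l => by
              rw [pvMantOk_nosign l hs, pvTail1_bad l (by simpa [pvDig] using hd) hdot]) (r.splitOn 'E')]
            simp [rQ0, hd, hs, hdot]

lemma alt_eq_chTwo (token : String) :
    is_scientific_notation_alt token = chTwo pvMantOk pvExpOk (token.toList.splitOn 'E') := by
  rcases hh : token.toList.splitOn 'E' with _ | ⟨m, _ | ⟨e, _ | _⟩⟩ <;>
    simp [is_scientific_notation_alt, hh, chTwo]

-- ===== VERDICT (by name: the statement is the Claim_ definition above) =====
theorem is_scientific_notation_spec : Claim_equal_is_scientific_notation := by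
  intro token _hdom
  unfold Spec_is_scientific_notation
  rw [alt_eq_chTwo, ← rQ0_char]
  show pvLoopA token.toList "q0" = rQ0 token.toList
  exact (pvLoopA_states token.toList).1
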